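-- pv_equiv track=rewrite | github.com/Sibal-IT/Coding-Test | illusion/14659.py | solution
-- ===== SOURCE A (Python) =====
-- def solution(n, sample):
--     answer = 0
--
--     for i in range(n):
--         temp = 0
--         for j in range(i+1, n):
--             if sample[i] < sample[j]:
--                 break
--             elif sample[i] > sample[j]:
--                 temp += 1
--
--         answer = max(answer, temp)
--         if answer > n - i:
--             break
--
--     return answer
-- ===== SOURCE B (Python) =====
-- def solution(n, sample):
--     # One right-to-left pass with a monotonic stack of merged segments.
--     # Each stack entry (v, seg_len, smaller) summarises a maximal block
--     # starting at value v: seg_len elements all <= v, of which `smaller`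
--     # are strictly below v.
--     stack = []
--     best = 0
--     for i in range(n - 1, -1, -1):
--         v = sample[i]
--         length = 0
--         smaller = 0
--         while stack and stack[-1][0] <= v:
--             w, L, s = stack.pop()
--             length += L
--             smaller += L if w < v else s
--         if smaller > best:
--             best = smaller
--         stack.append((v, length + 1, smaller))
--     return best
-- ===== Notes on version B (the rewrite author's own statement) =====
-- stated objective: faster
-- what changed: Replaced the quadratic per-index rescan of the following run with a single right-to-left pass over a monotonic stack that merges already-summarised segments (value, length, strictly-smaller count), so each element is pushed and popped once.
-- outside the precondition, e.g. on solution(7, [5, 0, 1, 2, 3, 9]): A returns 4, B raises IndexError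
import Mathlib
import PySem

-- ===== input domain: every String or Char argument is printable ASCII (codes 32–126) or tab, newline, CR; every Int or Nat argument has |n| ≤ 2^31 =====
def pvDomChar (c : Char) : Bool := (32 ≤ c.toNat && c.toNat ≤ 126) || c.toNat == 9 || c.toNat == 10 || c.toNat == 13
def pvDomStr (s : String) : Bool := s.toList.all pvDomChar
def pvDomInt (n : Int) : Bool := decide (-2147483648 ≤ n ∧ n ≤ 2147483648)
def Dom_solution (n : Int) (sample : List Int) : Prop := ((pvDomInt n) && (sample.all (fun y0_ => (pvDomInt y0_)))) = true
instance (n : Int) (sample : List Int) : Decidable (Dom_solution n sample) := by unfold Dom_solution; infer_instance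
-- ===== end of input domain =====

-- B replaces A's quadratic per-index rescan by a single right-to-left monotonic-stack pass
-- merging segment summaries (value, length, strictly-smaller count); objective: faster (asymptotic).


-- ===== PORT A =====
-- inner loop 'for j in range(i+1, n): …' with its break, state = temp
def innerA (si : Int) (sample : List Int) : List Int → Int → Int
  | [], temp => temp
  | j :: js, temp =>
    let sj := PySem.List.pyGetD sample j 0
    if si < sj then temp
    else if si > sj then innerA si sample js (temp + 1)
    else innerA si sample js temp

-- outer loop 'for i in range(n): …' with its early break, state = answer
def outerA (n : Int) (sample : List Int) : List Int → Int → Int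
  | [], answer => answer
  | i :: is, answer =>
    let si := PySem.List.pyGetD sample i 0
    let temp := innerA si sample (PySem.List.pyRange (i + 1) n 1) 0
    let answer' := max answer temp
    if answer' > n - i then answer' else outerA n sample is answer'

def solution (n : Int) (sample : List Int) : Int :=
  outerA n sample (PySem.List.pyRange 0 n 1) 0

-- ===== PORT B =====
-- 'while stack and stack[-1][0] <= v: …' pop loop; accumulator = (length, smaller)
def popB (v : Int) : List (Int × Int × Int) → Int × Int → List (Int × Int × Int) × Int × Int
  | [], acc => ([], acc)
  | (w, L, s) :: st, (len, sm) =>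
    if w ≤ v then popB v st (len + L, sm + (if w < v then L else s))
    else ((w, L, s) :: st, (len, sm))

-- 'for i in range(n-1, -1, -1): …', state = (stack, best)
def loopB (sample : List Int) : List Int → List (Int × Int × Int) → Int → Int
  | [], _, best => best
  | i :: is, stack, best =>
    let v := PySem.List.pyGetD sample i 0
    let (st, len, sm) := popB v stack (0, 0)
    loopB sample is ((v, len + 1, sm) :: st) (if sm > best then sm else best)

def solution_alt (n : Int) (sample : List Int) : Int :=
  loopB sample (PySem.List.pyRange (n - 1) (-1) (-1)) [] 0

-- ===== PRECONDITION & SPEC =====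
-- Pre_ excludes n > len(sample): there A's index accesses run off the end and raise
-- IndexError (except in rare cases where the early-exit break fires first, on which B raises).
def Pre_solution (n : Int) (sample : List Int) : Prop := n ≤ (sample.length : Int)
instance (n : Int) (sample : List Int) : Decidable (Pre_solution n sample) := by unfold Pre_solution; infer_instance
def pvWitness_solution : Int × List Int := (4, [2, 0, 1, 2, 3])

def Spec_solution (n : Int) (sample : List Int) (out : Int) : Prop := out = solution_alt n sample
instance (n : Int) (sample : List Int) (out : Int) : Decidable (Spec_solution n sample out) := by unfold Spec_solution; infer_instance

-- ===== CLAIM (what is proved, stated in full; the proofs are below) =====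
def Claim_equal_solution : Prop := ∀ (n : Int) (sample : List Int), Dom_solution n sample → Pre_solution n sample → Spec_solution n sample (solution n sample)

-- ===== LEMMAS AND PROOFS =====

-- the window after x: the run of following elements not exceeding x
def W (x : Int) (ys : List Int) : List Int := ys.takeWhile (fun y => y ≤ x)
-- the strictly-smaller count inside the window
def T (x : Int) (ys : List Int) : Int := ((W x ys).countP (fun y => y < x) : Int)
-- the maximum of T over every suffix decomposition
def bestSpec : List Int → Int
  | [] => 0
  | x :: ys => max (T x ys) (bestSpec ys)

-- T over a cons
theorem T_cons (x y : Int) (ys : List Int) :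
    T x (y :: ys) = if y ≤ x then (if y < x then 1 else 0) + T x ys else 0 := by
  simp only [T, W, List.takeWhile_cons]
  by_cases h : y ≤ x
  · simp [h, List.countP_cons]
    by_cases h2 : y < x <;> simp [h2] <;> omega
  · simp [h]

theorem T_nonneg (x : Int) (ys : List Int) : 0 ≤ T x ys := by
  simp [T]

theorem length_W_le (x : Int) (ys : List Int) : (W x ys).length ≤ ys.length := by
  simp only [W]
  induction ys with
  | nil => simp
  | cons a l ih => rw [List.takeWhile_cons]; split
                   · simpa using ih
                   · simp

theorem T_le_length (x : Int) (ys : List Int) : T x ys ≤ (ys.length : Int) := by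
  have h1 : (W x ys).countP (fun y => y < x) ≤ (W x ys).length := List.countP_le_length
  have h2 := length_W_le x ys
  simp only [T]
  omega

theorem bestSpec_nonneg (ys : List Int) : 0 ≤ bestSpec ys := by
  induction ys with
  | nil => simp [bestSpec]
  | cons y ys ih => simp only [bestSpec]; omega

theorem bestSpec_le_length (ys : List Int) : bestSpec ys ≤ (ys.length : Int) := by
  induction ys with
  | nil => simp [bestSpec]
  | cons y ys ih =>
    have := T_le_length y ys
    simp only [bestSpec, List.length_cons]
    push_cast
    omega

-- innerA with a shifted accumulator
theorem innerA_acc (si : Int) (sample : List Int) (js : List Int) (c : Int) :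
    innerA si sample js c = c + innerA si sample js 0 := by
  induction js generalizing c with
  | nil => simp [innerA]
  | cons j js ih =>
    simp only [innerA]
    split_ifs with h1 h2
    · omega
    · rw [ih (c + 1), ih (0 + 1)]; omega
    · rw [ih c]

-- the value of the inner loop: the strictly-smaller count of the window after index j-1
theorem innerA_eq (n : Int) (sample : List Int) (hn : n ≤ (sample.length : Int)) (si : Int) :
    ∀ (fuel : Nat) (j : Int), 0 ≤ j → (n - j).toNat = fuel →
      innerA si sample (PySem.List.pyRange j n 1) 0
        = T si ((sample.take n.toNat).drop j.toNat) := by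
  intro fuel
  induction fuel with
  | zero =>
    intro j hj hf
    have hjn : n ≤ j := by omega
    rw [PySem.List.pyRange_one_eq_nil hjn]
    have : (sample.take n.toNat).drop j.toNat = [] := by
      apply List.drop_eq_nil_of_le
      have := List.length_take_le n.toNat sample
      omega
    rw [this]
    simp [innerA, T, W]
  | succ fuel ih =>
    intro j hj hf
    by_cases hjn : j < n
    · rw [PySem.List.pyRange_one_cons hjn]
      have hjlen : j.toNat < (sample.take n.toNat).length := by
        rw [List.length_take]
        omega
      have hdrop := List.drop_eq_getElem_cons hjlen
      have hget : PySem.List.pyGetD sample j 0 = (sample.take n.toNat)[j.toNat] := by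
        rw [List.getElem_take, PySem.List.pyGetD_eq_getElem sample 0 hj (by
          rw [List.length_take] at hjlen
          omega)]
      simp only [innerA, hget]
      rw [hdrop, T_cons]
      have hrec : innerA si sample (PySem.List.pyRange (j + 1) n 1) 0
          = T si ((sample.take n.toNat).drop (j.toNat + 1)) := by
        have := ih (j + 1) (by omega) (by omega)
        rwa [show (j + 1).toNat = j.toNat + 1 by omega] at this
      set g := (sample.take n.toNat)[j.toNat] with hg
      rcases lt_trichotomy si g with h | h | h
      · -- si < s[j] : break, window empty
        rw [if_pos h, if_neg (show ¬ g ≤ si by omega)]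
      · -- equal : skip, not counted
        rw [if_neg (by omega), if_neg (by omega), hrec,
            if_pos (show g ≤ si by omega), if_neg (show ¬ g < si by omega)]
        ring
      · -- si > s[j] : counted
        rw [if_neg (by omega), if_pos (show si > g by omega), innerA_acc, hrec,
            if_pos (show g ≤ si by omega), if_pos (show g < si by omega)]
        ring
    · omega

-- the outer loop computes max of the accumulator and bestSpec of the remaining suffix
theorem outerA_eq (n : Int) (sample : List Int) (hn : n ≤ (sample.length : Int)) :
    ∀ (fuel : Nat) (i ans : Int), 0 ≤ i → (n - i).toNat = fuel → 0 ≤ ans →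
      outerA n sample (PySem.List.pyRange i n 1) ans
        = max ans (bestSpec ((sample.take n.toNat).drop i.toNat)) := by
  intro fuel
  induction fuel with
  | zero =>
    intro i ans hi hf hans
    have hin : n ≤ i := by omega
    rw [PySem.List.pyRange_one_eq_nil hin]
    have : (sample.take n.toNat).drop i.toNat = [] := by
      apply List.drop_eq_nil_of_le
      have := List.length_take_le n.toNat sample
      omega
    rw [this]
    simp [outerA, bestSpec]
    omega
  | succ fuel ih =>
    intro i ans hi hf hans
    by_cases hin : i < n
    · rw [PySem.List.pyRange_one_cons hin]
      have hilen : i.toNat < (sample.take n.toNat).length := by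
        rw [List.length_take]; omega
      have hdrop := List.drop_eq_getElem_cons hilen
      have hget : PySem.List.pyGetD sample i 0 = (sample.take n.toNat)[i.toNat] := by
        rw [List.getElem_take, PySem.List.pyGetD_eq_getElem sample 0 hi (by
          rw [List.length_take] at hilen
          omega)]
      have hinner := innerA_eq n sample hn ((sample.take n.toNat)[i.toNat]) (n - (i+1)).toNat (i+1) (by omega) rfl
      rw [show (i + 1).toNat = i.toNat + 1 by omega] at hinner
      have hrest_le : bestSpec ((sample.take n.toNat).drop (i.toNat + 1)) ≤ n - i - 1 := by
        have h1 := bestSpec_le_length ((sample.take n.toNat).drop (i.toNat + 1))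
        have h2 : (((sample.take n.toNat).drop (i.toNat + 1)).length : Int) ≤ n - i - 1 := by
          rw [List.length_drop, List.length_take]
          omega
        omega
      simp only [outerA, hget, hinner]
      rw [hdrop, bestSpec]
      split_ifs with hbr
      · -- early break: the remaining suffix cannot beat answer'
        have := T_nonneg ((sample.take n.toNat)[i.toNat]) ((sample.take n.toNat).drop (i.toNat + 1))
        omega
      · rw [ih (i + 1) _ (by omega) (by omega) (by omega)]
        rw [show (i + 1).toNat = i.toNat + 1 by omega]
        omega
    · omega

theorem solution_eq_bestSpec (n : Int) (sample : List Int) (hn : n ≤ (sample.length : Int)) :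
    solution n sample = bestSpec (sample.take n.toNat) := by
  rw [solution, outerA_eq n sample hn (n - 0).toNat 0 0 le_rfl rfl le_rfl]
  simp only [Int.toNat_zero, List.drop_zero]
  have := bestSpec_nonneg (sample.take n.toNat)
  omega

-- stack invariant: the stack summarises a suffix as nested (value, window) segments
def SInv : List (Int × Int × Int) → List Int → Prop
  | [], ys => ys = []
  | (v, L, s) :: st, ys =>
    ∃ tail, ys = v :: tail ∧ L = 1 + ((W v tail).length : Int) ∧ s = T v tail ∧
      SInv st (tail.dropWhile (fun y => y ≤ v))

theorem takeWhile_append_all {p : Int → Bool} {l₁ : List Int} (l₂ : List Int)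
    (h : ∀ a ∈ l₁, p a = true) : (l₁ ++ l₂).takeWhile p = l₁ ++ l₂.takeWhile p := by
  induction l₁ with
  | nil => simp
  | cons a l ih =>
    rw [List.cons_append, List.takeWhile_cons, if_pos (h a List.mem_cons_self), ih]
    · rfl
    · intro b hb; exact h b (List.mem_cons_of_mem a hb)

theorem dropWhile_append_all {p : Int → Bool} {l₁ : List Int} (l₂ : List Int)
    (h : ∀ a ∈ l₁, p a = true) : (l₁ ++ l₂).dropWhile p = l₂.dropWhile p := by
  induction l₁ with
  | nil => simp
  | cons a l ih =>
    rw [List.cons_append, List.dropWhile_cons, if_pos (h a List.mem_cons_self), ih]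
    intro b hb; exact h b (List.mem_cons_of_mem a hb)

-- the pop loop absorbs exactly the window of v and counts its strictly-smaller elements
theorem popB_spec (v : Int) : ∀ (stack : List (Int × Int × Int)) (ys : List Int) (len sm : Int),
    SInv stack ys →
    ∃ st', popB v stack (len, sm) = (st', len + ((W v ys).length : Int), sm + T v ys) ∧
      SInv st' (ys.dropWhile (fun y => y ≤ v)) := by
  intro stack
  induction stack with
  | nil =>
    intro ys len sm hinv
    have : ys = [] := hinv
    subst this
    exact ⟨[], by simp [popB, W, T], by simp [SInv]⟩
  | cons e st ih =>
    obtain ⟨w, L, s⟩ := e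
    intro ys len sm hinv
    obtain ⟨tail, rfl, hL, hs, hst⟩ := hinv
    by_cases hwv : w ≤ v
    · -- pop: the whole segment of w lies inside the window of v
      have hsplit : W w tail ++ tail.dropWhile (fun y => y ≤ w) = tail :=
        List.takeWhile_append_dropWhile
      have hallw : ∀ a ∈ W w tail, (decide (a ≤ v)) = true := by
        intro a ha
        have := List.mem_takeWhile_imp ha
        simp at this ⊢
        omega
      obtain ⟨st', heq, hinv'⟩ :=
        ih (tail.dropWhile (fun y => y ≤ w)) (len + L) (sm + if w < v then L else s) hst
      -- the window of v over the full suffix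
      have hWv : W v (w :: tail) = w :: (W w tail ++ W v (tail.dropWhile (fun y => y ≤ w))) := by
        rw [W, List.takeWhile_cons, if_pos (by simpa using hwv)]
        conv_lhs => rw [← hsplit]
        rw [takeWhile_append_all _ hallw]
        rfl
      have hlen : ((W v (w :: tail)).length : Int)
          = L + ((W v (tail.dropWhile (fun y => y ≤ w))).length : Int) := by
        rw [hWv]
        simp [hL]
        push_cast
        ring
      have hcnt : T v (w :: tail)
          = (if w < v then L else s) + T v (tail.dropWhile (fun y => y ≤ w)) := by
        rw [T, hWv, List.countP_cons, List.countP_append]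
        by_cases hlt : w < v
        · have : (W w tail).countP (fun y => y < v) = (W w tail).length := by
            apply List.countP_eq_length.2
            intro a ha
            have := List.mem_takeWhile_imp ha
            simp at this ⊢
            omega
          rw [this]
          simp [hlt, T, hL]
          push_cast
          ring
        · have hw_eq : w = v := by omega
          subst hw_eq
          simp [hs, T]
      have hdw : (w :: tail).dropWhile (fun y => y ≤ v)
          = (tail.dropWhile (fun y => y ≤ w)).dropWhile (fun y => y ≤ v) := by
        rw [List.dropWhile_cons, if_pos (by simpa using hwv)]
        conv_lhs => rw [← hsplit]
        rw [dropWhile_append_all _ hallw]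
      refine ⟨st', ?_, by rw [hdw]; exact hinv'⟩
      rw [popB, if_pos hwv, heq, hlen, hcnt]
      simp only [Prod.mk.injEq, true_and]
      exact ⟨by ring, by ring⟩
    · -- stop: the head is the next strictly greater element, the window of v is empty
      have hWnil : W v (w :: tail) = [] := by
        rw [W, List.takeWhile_cons, if_neg (by simpa using hwv)]
      refine ⟨(w, L, s) :: st, ?_, ?_⟩
      · rw [popB, if_neg hwv]
        simp [T, hWnil]
      · rw [List.dropWhile_cons, if_neg (by simpa using hwv)]
        exact ⟨tail, rfl, hL, hs, hst⟩

-- the strictly-smaller count of the window after position m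
def tempAt (pf : List Int) (m : Nat) : Int := T (pf.getD m 0) (pf.drop (m + 1))

-- max of tempAt over positions 0..m-1
def B2 (pf : List Int) : Nat → Int
  | 0 => 0
  | m + 1 => max (B2 pf m) (tempAt pf m)

theorem B2_nonneg (pf : List Int) (m : Nat) : 0 ≤ B2 pf m := by
  induction m with
  | zero => simp [B2]
  | succ m ih => simp only [B2]; omega

theorem loopB_eq (n : Int) (sample : List Int) (hn : n ≤ (sample.length : Int)) :
    ∀ (m : Nat) (stack : List (Int × Int × Int)) (best : Int),
      m ≤ (sample.take n.toNat).length →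
      SInv stack ((sample.take n.toNat).drop m) → 0 ≤ best →
      loopB sample (PySem.List.pyRange ((m : Int) - 1) (-1) (-1)) stack best
        = max best (B2 (sample.take n.toNat) m) := by
  intro m
  induction m with
  | zero =>
    intro stack best _ _ hbest
    rw [PySem.List.pyRange_neg_one_eq_nil (by omega)]
    simp only [loopB, B2]
    omega
  | succ m ih =>
    intro stack best hm hinv hbest
    have hml : m < (sample.take n.toNat).length := by omega
    have hms : ((m : Int) + 1 - 1) = (m : Int) := by ring
    rw [show (((m + 1 : Nat)) : Int) - 1 = (m : Int) by push_cast; ring,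
        PySem.List.pyRange_neg_one_cons (by omega)]
    have hget : PySem.List.pyGetD sample (m : Int) 0 = (sample.take n.toNat)[m] := by
      rw [List.getElem_take, PySem.List.pyGetD_eq_getElem sample 0 (by omega) (by
        rw [List.length_take] at hml
        omega)]
      simp
    obtain ⟨st', heq, hinv'⟩ := popB_spec ((sample.take n.toNat)[m]) stack
      ((sample.take n.toNat).drop (m + 1)) 0 0 hinv
    have hdropm := List.drop_eq_getElem_cons hml
    simp only [loopB, hget, heq]
    have hIH := ih ((((sample.take n.toNat)[m]),
        0 + ((W ((sample.take n.toNat)[m]) ((sample.take n.toNat).drop (m + 1))).length : Int) + 1,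
        0 + T ((sample.take n.toNat)[m]) ((sample.take n.toNat).drop (m + 1))) :: st')
      (if 0 + T ((sample.take n.toNat)[m]) ((sample.take n.toNat).drop (m + 1)) > best
        then 0 + T ((sample.take n.toNat)[m]) ((sample.take n.toNat).drop (m + 1)) else best)
      (by omega)
      (⟨(sample.take n.toNat).drop (m + 1), hdropm, by omega, by omega, hinv'⟩)
      (by
        have := T_nonneg ((sample.take n.toNat)[m]) ((sample.take n.toNat).drop (m + 1))
        split_ifs <;> omega)
    rw [hIH]
    have htemp : tempAt (sample.take n.toNat) m
        = T ((sample.take n.toNat)[m]) ((sample.take n.toNat).drop (m + 1)) := by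
      rw [tempAt, List.getD_eq_getElem _ _ hml]
    simp only [B2, htemp]
    split_ifs <;> omega

-- B2 over the whole prefix is bestSpec
theorem B2_bestSpec (pf : List Int) :
    ∀ (m : Nat), m ≤ pf.length → max (B2 pf m) (bestSpec (pf.drop m)) = bestSpec pf := by
  intro m
  induction m with
  | zero =>
    intro _
    have := bestSpec_nonneg pf
    simp only [B2, List.drop_zero]
    omega
  | succ m ih =>
    intro hm
    have hml : m < pf.length := by omega
    have hdropm := List.drop_eq_getElem_cons hml
    have htemp : tempAt pf m = T pf[m] (pf.drop (m + 1)) := by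
      rw [tempAt, List.getD_eq_getElem _ _ hml]
    rw [← ih (by omega), hdropm, bestSpec, B2, htemp]
    omega

theorem solution_alt_eq_bestSpec (n : Int) (sample : List Int) (hn : n ≤ (sample.length : Int)) :
    solution_alt n sample = bestSpec (sample.take n.toNat) := by
  rw [solution_alt]
  by_cases hpos : 0 < n
  · have hlen : (sample.take n.toNat).length = n.toNat := by
      rw [List.length_take]
      omega
    have hcast : n - 1 = ((n.toNat : Int)) - 1 := by omega
    rw [hcast, show ((n.toNat : Int)) = (((sample.take n.toNat).length : Nat) : Int) by rw [hlen]]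
    rw [loopB_eq n sample hn (sample.take n.toNat).length [] 0 le_rfl
        (by simp [SInv]) le_rfl]
    have h1 := B2_bestSpec (sample.take n.toNat) (sample.take n.toNat).length le_rfl
    rw [List.drop_length] at h1
    have h2 := B2_nonneg (sample.take n.toNat) (sample.take n.toNat).length
    simp only [bestSpec] at h1
    omega
  · rw [PySem.List.pyRange_neg_one_eq_nil (by omega)]
    rw [show n.toNat = 0 by omega]
    simp [loopB, bestSpec]

-- ===== VERDICT (by name: the statement is the Claim_ definition above) =====
theorem solution_spec : Claim_equal_solution := by
  intro n sample _ hpre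
  unfold Spec_solution
  rw [solution_eq_bestSpec n sample hpre, solution_alt_eq_bestSpec n sample hpre]
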